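-- pv_equiv track=rewrite | github.com/purplefish1412/crypro-24-25 | lab3/dazhuk_fb-22_kopylov_fb-22_cp3/lab3.py | find_bigram_combinations
-- ===== SOURCE A (Python) =====
-- import itertools
--
-- def find_bigram_combinations(bigrams1, bigrams2):
--     bigram_combinations = []
--     bigram_combinations1 = list(itertools.combinations(bigrams1, 2))
--     bigram_combinations2 = list(itertools.combinations(bigrams2, 2))
--     for bigram in bigram_combinations1:
--         for cipher in bigram_combinations2:
--             bigram_combinations.append(list(zip(bigram, cipher)))
--
--     return bigram_combinations
-- ===== SOURCE B (Python) =====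
-- def find_bigram_combinations(bigrams1, bigrams2):
--     L1, L2 = list(bigrams1), list(bigrams2)
--     n, m = len(L1), len(L2)
--     if n < 2 or m < 2:
--         return []
--     out = []
--     # single flat loop: (i, j, k, l) advanced odometer-style through the
--     # lexicographic 2-combination index pairs of L1 (outer) and L2 (inner)
--     i, j, k, l = 0, 1, 0, 1
--     while True:
--         out.append([(L1[i], L2[k]), (L1[j], L2[l])])
--         if l + 1 < m:
--             l += 1
--         elif k + 2 < m:
--             k += 1
--             l = k + 1
--         elif j + 1 < n:
--             k, l = 0, 1
--             j += 1
--         elif i + 2 < n: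
--             k, l = 0, 1
--             i += 1
--             j = i + 1
--         else:
--             break
--     return out
-- ===== Notes on version B (the rewrite author's own statement) =====
-- stated objective: alternative
-- what changed: B replaces the two materialised itertools.combinations tables and the nested for-loops by a single flat state-machine loop: four explicit indices (i,j,k,l) advanced odometer-style through the lexicographic combination index pairs, emitting one result element per iteration.
import Mathlib
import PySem

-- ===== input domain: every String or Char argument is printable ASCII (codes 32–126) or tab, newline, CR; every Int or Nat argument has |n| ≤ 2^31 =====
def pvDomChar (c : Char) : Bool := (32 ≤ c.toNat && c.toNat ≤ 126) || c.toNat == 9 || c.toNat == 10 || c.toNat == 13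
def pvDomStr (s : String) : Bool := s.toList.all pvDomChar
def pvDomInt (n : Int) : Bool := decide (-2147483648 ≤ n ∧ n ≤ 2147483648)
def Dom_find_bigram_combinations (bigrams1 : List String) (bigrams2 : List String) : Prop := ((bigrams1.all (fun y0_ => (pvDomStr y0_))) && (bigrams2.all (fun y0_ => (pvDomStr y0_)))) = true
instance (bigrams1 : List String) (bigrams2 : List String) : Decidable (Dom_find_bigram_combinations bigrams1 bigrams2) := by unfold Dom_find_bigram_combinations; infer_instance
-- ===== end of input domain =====

-- B drops the two materialised combination tables and the nested loops in favour of a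
-- single flat state-machine loop over four odometer indices (alternative decomposition).

-- ===== PORT A =====
-- list(itertools.combinations(xs, 2)) in iteration order
def pvComb2 {α : Type} : List α → List (α × α)
  | [] => []
  | x :: rest => rest.map (fun y => (x, y)) ++ pvComb2 rest

def find_bigram_combinations (bigrams1 : List String) (bigrams2 : List String) : List (List (String × String)) :=
  let bigram_combinations1 := pvComb2 bigrams1
  let bigram_combinations2 := pvComb2 bigrams2
  bigram_combinations1.foldl (fun acc bigram =>
    bigram_combinations2.foldl (fun acc cipher =>
      -- list(zip(bigram, cipher)) for 2-tuples
      acc ++ [[(bigram.1, cipher.1), (bigram.2, cipher.2)]]) acc) []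

-- ===== PORT B =====
-- the 'while True' odometer loop of Source B; indices are Nat (the Python indices are
-- provably ≥ 0), L.getD i "" is Python's L[i], exact for the in-range indices the
-- loop maintains
def pvRun (L1 L2 : List String) (n m i j k l : Nat)
    (out : List (List (String × String))) : List (List (String × String)) :=
  let out' := out ++ [[(L1.getD i "", L2.getD k ""), (L1.getD j "", L2.getD l "")]]
  if l + 1 < m then pvRun L1 L2 n m i j k (l + 1) out'
  else if k + 2 < m then pvRun L1 L2 n m i j (k + 1) (k + 2) out'
  else if j + 1 < n then pvRun L1 L2 n m i (j + 1) 0 1 out'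
  else if i + 2 < n then pvRun L1 L2 n m (i + 1) (i + 2) 0 1 out'
  else out'
termination_by (n - i, n - j, m - k, m - l)

def find_bigram_combinations_alt (bigrams1 : List String) (bigrams2 : List String) : List (List (String × String)) :=
  let n := bigrams1.length
  let m := bigrams2.length
  if n < 2 ∨ m < 2 then []
  else pvRun bigrams1 bigrams2 n m 0 1 0 1 []

-- ===== PRECONDITION & SPEC =====
def Spec_find_bigram_combinations (bigrams1 : List String) (bigrams2 : List String) (out : List (List (String × String))) : Prop := out = find_bigram_combinations_alt bigrams1 bigrams2
instance (bigrams1 : List String) (bigrams2 : List String) (out : List (List (String × String))) : Decidable (Spec_find_bigram_combinations bigrams1 bigrams2 out) := by unfold Spec_find_bigram_combinations; infer_instance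

-- ===== CLAIM (what is proved, stated in full; the proofs are below) =====
def Claim_equal_find_bigram_combinations : Prop := ∀ (bigrams1 : List String) (bigrams2 : List String), Dom_find_bigram_combinations bigrams1 bigrams2 → Spec_find_bigram_combinations bigrams1 bigrams2 (find_bigram_combinations bigrams1 bigrams2)

-- ===== LEMMAS AND PROOFS =====

-- one result element
def pvMk (x y : String) (q : String × String) : List (String × String) := [(x, q.1), (y, q.2)]

-- the element pairs of L2 still to be emitted from column state (k, l)
def pvRem2 (L2 : List String) (k l : Nat) : List (String × String) :=
  (L2.drop l).map (fun v => (L2.getD k "", v)) ++ pvComb2 (L2.drop (k + 1))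

-- the element pairs of L1 still to be emitted from row state (i, j)
def pvRem1 (L1 : List String) (i j : Nat) : List (String × String) :=
  (L1.drop j).map (fun y => (L1.getD i "", y)) ++ pvComb2 (L1.drop (i + 1))

theorem pv_drop_cons {α : Type} (xs : List α) (i : Nat) (h : i < xs.length) (d : α) :
    xs.drop i = xs.getD i d :: xs.drop (i + 1) := by
  rw [List.drop_eq_getElem_cons h, List.getD_eq_getElem xs d h]

theorem pv_rem2_zero_one (L2 : List String) (h : L2 ≠ []) :
    pvRem2 L2 0 1 = pvComb2 L2 := by
  cases L2 with
  | nil => exact absurd rfl h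
  | cons x t => simp [pvRem2, pvComb2]

theorem pv_rem1_zero_two (L1 : List String) (x y : String) (t : List String)
    (hL : L1 = x :: y :: t) :
    pvComb2 L1 = (x, y) :: pvRem1 L1 0 2 := by
  subst hL; simp [pvRem1, pvComb2]

theorem pvComb2_drop_step (L : List String) (a : Nat) (h : a + 1 < L.length) :
    pvComb2 (L.drop a) =
      (L.getD a "", L.getD (a + 1) "") ::
        ((L.drop (a + 2)).map (fun y => (L.getD a "", y)) ++ pvComb2 (L.drop (a + 1))) := by
  rw [pv_drop_cons L a (by omega) "", pv_drop_cons L (a + 1) (by omega) "",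
    show a + 1 + 1 = a + 2 from by omega]
  simp [pvComb2]

-- master invariant: from a valid state, pvRun appends exactly the remaining output
theorem pvRun_eq (L1 L2 : List String) (i j k l : Nat)
    (out : List (List (String × String)))
    (hij : i < j) (hj : j < L1.length) (hkl : k < l) (hl : l < L2.length) :
    pvRun L1 L2 L1.length L2.length i j k l out =
      out ++ (pvRem2 L2 k l).map (pvMk (L1.getD i "") (L1.getD j ""))
          ++ (pvRem1 L1 i (j + 1)).flatMap (fun p => (pvComb2 L2).map (pvMk p.1 p.2)) := by
  rw [pvRun]
  set n := L1.length with hn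
  set m := L2.length with hm
  by_cases h1 : l + 1 < m
  · rw [if_pos h1, pvRun_eq L1 L2 i j k (l + 1) _ hij hj (by omega) (by omega)]
    have : pvRem2 L2 k l = (L2.getD k "", L2.getD l "") :: pvRem2 L2 k (l + 1) := by
      unfold pvRem2
      rw [pv_drop_cons L2 l (by omega) ""]
      simp
    rw [this]; simp [pvMk]
  · rw [if_neg h1]
    by_cases h2 : k + 2 < m
    · rw [if_pos h2, pvRun_eq L1 L2 i j (k + 1) (k + 2) _ hij hj (by omega) (by omega)]
      have hdl : L2.drop l = [L2.getD l ""] := by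
        rw [pv_drop_cons L2 l (by omega) "", List.drop_eq_nil_of_le (by omega)]
      have : pvRem2 L2 k l = (L2.getD k "", L2.getD l "") :: pvRem2 L2 (k + 1) (k + 2) := by
        unfold pvRem2
        rw [hdl, pv_drop_cons L2 (k + 1) (by omega) ""]
        simp [pvComb2]
      rw [this]; simp [pvMk]
    · rw [if_neg h2]
      -- here l = m - 1 and k = m - 2: the current column block is exhausted
      have hdl : L2.drop l = [L2.getD l ""] := by
        rw [pv_drop_cons L2 l (by omega) "", List.drop_eq_nil_of_le (by omega)]
      have hck : pvComb2 (L2.drop (k + 1)) = [] := by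
        rw [pv_drop_cons L2 (k + 1) (by omega) "", List.drop_eq_nil_of_le (by omega)]
        simp [pvComb2]
      have hrem2 : pvRem2 L2 k l = [(L2.getD k "", L2.getD l "")] := by
        unfold pvRem2; rw [hdl, hck]; simp
      have hm2 : L2 ≠ [] := List.ne_nil_of_length_pos (by omega)
      by_cases h3 : j + 1 < n
      · rw [if_pos h3, pvRun_eq L1 L2 i (j + 1) 0 1 _ (by omega) (by omega) (by omega) (by omega)]
        have hr1 : pvRem1 L1 i (j + 1) =
            (L1.getD i "", L1.getD (j + 1) "") :: pvRem1 L1 i (j + 2) := by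
          unfold pvRem1
          rw [pv_drop_cons L1 (j + 1) (by omega) ""]
          simp
        rw [hr1, pv_rem2_zero_one L2 hm2, hrem2]
        simp [pvMk]
      · rw [if_neg h3]
        have hr1n : pvRem1 L1 i (j + 1) = pvComb2 (L1.drop (i + 1)) := by
          unfold pvRem1
          rw [List.drop_eq_nil_of_le (by omega)]
          simp
        by_cases h4 : i + 2 < n
        · rw [if_pos h4, pvRun_eq L1 L2 (i + 1) (i + 2) 0 1 _ (by omega) (by omega) (by omega) (by omega)]
          have hr1' : pvComb2 (L1.drop (i + 1)) =
              (L1.getD (i + 1) "", L1.getD (i + 2) "") :: pvRem1 L1 (i + 1) (i + 3) := by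
            rw [pvComb2_drop_step L1 (i + 1) (by omega)]
            unfold pvRem1
            rw [show i + 1 + 1 = i + 2 from by omega, show i + 1 + 2 = i + 3 from by omega]
          rw [hr1n, hr1', pv_rem2_zero_one L2 hm2, hrem2]
          simp [pvMk]
        · rw [if_neg h4]
          -- final state: i = n - 2, j = n - 1, nothing remains
          have : pvComb2 (L1.drop (i + 1)) = [] := by
            rw [pv_drop_cons L1 (i + 1) (by omega) "", List.drop_eq_nil_of_le (by omega)]
            simp [pvComb2]
          rw [hr1n, this, hrem2]
          simp [pvMk]
termination_by (L1.length - i, L1.length - j, L2.length - k, L2.length - l)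

theorem find_bigram_combinations_spec : Claim_equal_find_bigram_combinations := by
  intro b1 b2 _
  unfold Spec_find_bigram_combinations find_bigram_combinations find_bigram_combinations_alt
  simp only [PySem.List.foldl_append_singleton_eq_map, PySem.List.foldl_append_eq_flatMap,
    List.nil_append]
  by_cases hsmall : b1.length < 2 ∨ b2.length < 2
  · rw [if_pos hsmall]
    rcases hsmall with h | h
    · match b1, h with
      | [], _ => simp [pvComb2]
      | [x], _ => simp [pvComb2]
    · match b2, h with
      | [], _ => simp [pvComb2]
      | [x], _ => simp [pvComb2]
  · rw [if_neg hsmall]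
    simp only [not_or, Nat.not_lt] at hsmall
    rw [pvRun_eq b1 b2 0 1 0 1 [] (by omega) (by omega) (by omega) (by omega)]
    obtain ⟨x, y, t, hb1⟩ : ∃ x y t, b1 = x :: y :: t := by
      match b1, hsmall.1 with
      | x :: y :: t, _ => exact ⟨x, y, t, rfl⟩
    have hb2ne : b2 ≠ [] := List.ne_nil_of_length_pos (by omega)
    rw [pv_rem2_zero_one b2 hb2ne, pv_rem1_zero_two b1 x y t hb1]
    have hx : b1.getD 0 "" = x := by rw [hb1]; rfl
    have hy : b1.getD 1 "" = y := by rw [hb1]; rfl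
    rw [hx, hy]
    rfl
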